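-- pv_equiv track=rewrite | github.com/TousakaNagio/EECP_onlinejudge | DiceRotations.py | solution
-- ===== SOURCE A (Python) =====
-- def solution(A):
--     # write your code in Python 3.6
--     # you only need to modify this function
--     a = [1,6]
--     b = [2,5]
--     c = [3,4]
--     total = []
--     #if [x for x in a if x in A] == a:
--     for i in range(1,7):
--         count = 0
--         for x in A:
--             if i==1 and x in b+c:
--                 count += 1
--             elif i==1 and x==6:
--                 count += 2
--             if i==2 and x in a+c:
--                 count += 1
--             elif i==2 and x==5:
--                 count += 2
--             if i==3 and x in b+a:
--                 count += 1
--             elif i==3 and x==4: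
--                 count += 2
--             if i==4 and x in b+a:
--                 count += 1
--             elif i==4 and x==3:
--                 count += 2
--             if i==5 and x in a+c:
--                 count += 1
--             elif i==5 and x==2:
--                 count += 2
--             if i==6 and x in b+c:
--                 count += 1
--             elif i==6 and x==1:
--                 count += 2
--         total.append(count)
--
--     return min(total)
--     pass
-- ===== SOURCE B (Python) =====
-- def solution(A):
--     # One tally pass, then six table-driven costs: face i costs 0, opposite 7-i costs 2,
--     # any other face in 1..6 costs 1; values outside 1..6 cost 0.
--     cnt = [0] * 7
--     for x in A:
--         if 1 <= x <= 6:
--             cnt[x] += 1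
--     n = sum(cnt)
--     return min((n - cnt[i]) + cnt[7 - i] for i in range(1, 7))
-- ===== Notes on version B (the rewrite author's own statement) =====
-- stated objective: faster
-- what changed: Replaces six full rescans of A (each running an unmatched six-way if/elif ladder with list-membership tests per element) by one frequency-tally pass over A plus six closed-form costs (n - cnt[i] + cnt[7-i]) read off the tally.
import Mathlib
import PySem

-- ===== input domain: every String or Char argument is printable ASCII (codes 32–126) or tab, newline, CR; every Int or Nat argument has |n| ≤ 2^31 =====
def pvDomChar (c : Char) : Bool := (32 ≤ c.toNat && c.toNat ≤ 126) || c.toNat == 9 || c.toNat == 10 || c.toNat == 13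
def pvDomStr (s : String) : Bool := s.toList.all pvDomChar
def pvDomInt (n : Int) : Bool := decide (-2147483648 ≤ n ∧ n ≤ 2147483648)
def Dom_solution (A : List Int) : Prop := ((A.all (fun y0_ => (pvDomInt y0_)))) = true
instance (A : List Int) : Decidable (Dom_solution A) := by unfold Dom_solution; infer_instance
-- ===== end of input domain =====

-- B replaces A's six rescans of A (with an if/elif ladder) by ONE tally pass plus six
-- table-driven costs read off the tally; measurably faster by a constant factor.


-- ===== PORT A =====
-- the six sequential if/elif statements of A's inner loop body, step for step
def ladder (i : Int) (count0 x : Int) : Int :=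
  let count := count0
  let count := if i = 1 ∧ x ∈ ([2,5] ++ [3,4] : List Int) then count + 1 else if i = 1 ∧ x = 6 then count + 2 else count
  let count := if i = 2 ∧ x ∈ ([1,6] ++ [3,4] : List Int) then count + 1 else if i = 2 ∧ x = 5 then count + 2 else count
  let count := if i = 3 ∧ x ∈ ([2,5] ++ [1,6] : List Int) then count + 1 else if i = 3 ∧ x = 4 then count + 2 else count
  let count := if i = 4 ∧ x ∈ ([2,5] ++ [1,6] : List Int) then count + 1 else if i = 4 ∧ x = 3 then count + 2 else count
  let count := if i = 5 ∧ x ∈ ([1,6] ++ [3,4] : List Int) then count + 1 else if i = 5 ∧ x = 2 then count + 2 else count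
  let count := if i = 6 ∧ x ∈ ([2,5] ++ [3,4] : List Int) then count + 1 else if i = 6 ∧ x = 1 then count + 2 else count
  count

def solution (A : List Int) : Int :=
  let total : List Int :=
    (PySem.List.pyRange 1 7 1).foldl (fun total i => total ++ [A.foldl (ladder i) 0]) []
  -- min(total): total always has six entries, so the default of min? is never used
  (PySem.List.min? total (fun y => y)).getD 0

-- ===== PORT B =====
-- cnt[x] += 1 guarded by 1 <= x <= 6; the index is therefore always in range
def tallyStep (cnt : List Int) (x : Int) : List Int :=
  if 1 ≤ x ∧ x ≤ 6 then cnt.set x.toNat (((PySem.List.pyGet? cnt x).getD 0) + 1) else cnt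

def solution_alt (A : List Int) : Int :=
  let cnt := A.foldl tallyStep [0,0,0,0,0,0,0]
  let n := cnt.sum
  let costs := (PySem.List.pyRange 1 7 1).map
    (fun i => (n - (PySem.List.pyGet? cnt i).getD 0) + (PySem.List.pyGet? cnt (7 - i)).getD 0)
  -- min(generator): six entries, the default is never used
  (PySem.List.min? costs (fun y => y)).getD 0

-- ===== PRECONDITION & SPEC =====
def Spec_solution (A : List Int) (out : Int) : Prop := out = solution_alt A
instance (A : List Int) (out : Int) : Decidable (Spec_solution A out) := by unfold Spec_solution; infer_instance

-- ===== CLAIM (what is proved, stated in full; the proofs are below) =====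
def Claim_equal_solution : Prop := ∀ (A : List Int), Dom_solution A → Spec_solution A (solution A)

-- ===== LEMMAS AND PROOFS =====

-- number of occurrences of j in the list, as an Int
def cnt1 (j : Int) : List Int → Int
  | [] => 0
  | x :: l => (if x = j then 1 else 0) + cnt1 j l

theorem tally_spec : ∀ (l : List Int) (a0 a1 a2 a3 a4 a5 a6 : Int),
    l.foldl tallyStep [a0,a1,a2,a3,a4,a5,a6] =
      [a0, a1 + cnt1 1 l, a2 + cnt1 2 l, a3 + cnt1 3 l, a4 + cnt1 4 l, a5 + cnt1 5 l, a6 + cnt1 6 l] := by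
  intro l
  induction l with
  | nil => intro a0 a1 a2 a3 a4 a5 a6; simp [cnt1]
  | cons x t ih =>
    intro a0 a1 a2 a3 a4 a5 a6
    by_cases h : 1 ≤ x ∧ x ≤ 6
    · have hx : x = 1 ∨ x = 2 ∨ x = 3 ∨ x = 4 ∨ x = 5 ∨ x = 6 := by omega
      rcases hx with hx1 | hx2 | hx3 | hx4 | hx5 | hx6
      · subst hx1
        simp only [List.foldl]
        rw [show tallyStep [a0,a1,a2,a3,a4,a5,a6] 1 = [a0,a1+1,a2,a3,a4,a5,a6] from rfl, ih]
        simp [cnt1]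
        try omega
      · subst hx2
        simp only [List.foldl]
        rw [show tallyStep [a0,a1,a2,a3,a4,a5,a6] 2 = [a0,a1,a2+1,a3,a4,a5,a6] from rfl, ih]
        simp [cnt1]
        try omega
      · subst hx3
        simp only [List.foldl]
        rw [show tallyStep [a0,a1,a2,a3,a4,a5,a6] 3 = [a0,a1,a2,a3+1,a4,a5,a6] from rfl, ih]
        simp [cnt1]
        try omega
      · subst hx4
        simp only [List.foldl]
        rw [show tallyStep [a0,a1,a2,a3,a4,a5,a6] 4 = [a0,a1,a2,a3,a4+1,a5,a6] from rfl, ih]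
        simp [cnt1]
        try omega
      · subst hx5
        simp only [List.foldl]
        rw [show tallyStep [a0,a1,a2,a3,a4,a5,a6] 5 = [a0,a1,a2,a3,a4,a5+1,a6] from rfl, ih]
        simp [cnt1]
        try omega
      · subst hx6
        simp only [List.foldl]
        rw [show tallyStep [a0,a1,a2,a3,a4,a5,a6] 6 = [a0,a1,a2,a3,a4,a5,a6+1] from rfl, ih]
        simp [cnt1]
        try omega
    · simp only [List.foldl]
      rw [show tallyStep [a0,a1,a2,a3,a4,a5,a6] x = [a0,a1,a2,a3,a4,a5,a6] by simp [tallyStep, h]]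
      rw [ih]
      simp only [cnt1, List.cons.injEq, true_and, and_true]
      split_ifs <;> omega

theorem loop_spec : ∀ (i : Int), i = 1 ∨ i = 2 ∨ i = 3 ∨ i = 4 ∨ i = 5 ∨ i = 6 →
    ∀ (l : List Int) (acc : Int),
    l.foldl (ladder i) acc =
      acc + ((cnt1 1 l + cnt1 2 l + cnt1 3 l + cnt1 4 l + cnt1 5 l + cnt1 6 l) - cnt1 i l + cnt1 (7 - i) l) := by
  intro i hi l
  induction l with
  | nil => intro acc; rcases hi with rfl | rfl | rfl | rfl | rfl | rfl <;> simp [cnt1]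
  | cons x t ihl =>
    intro acc
    simp only [List.foldl]
    rw [ihl]
    rcases hi with rfl | rfl | rfl | rfl | rfl | rfl <;>
      · simp only [ladder, cnt1, List.mem_append, List.mem_cons, List.not_mem_nil]
        norm_num
        split_ifs <;> omega

theorem solution_eq (A : List Int) : solution A = solution_alt A := by
  unfold solution solution_alt
  rw [show PySem.List.pyRange 1 7 1 = [1,2,3,4,5,6] from rfl]
  rw [tally_spec A 0 0 0 0 0 0 0]
  simp only [List.foldl, List.map, List.sum_cons, List.sum_nil, zero_add, List.nil_append]
  rw [loop_spec 1 (by norm_num) A 0, loop_spec 2 (by norm_num) A 0, loop_spec 3 (by norm_num) A 0,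
      loop_spec 4 (by norm_num) A 0, loop_spec 5 (by norm_num) A 0, loop_spec 6 (by norm_num) A 0]
  rw [show (PySem.List.pyGet? [0, cnt1 1 A, cnt1 2 A, cnt1 3 A, cnt1 4 A, cnt1 5 A, cnt1 6 A] (1:Int)).getD 0 = cnt1 1 A from rfl,
      show (PySem.List.pyGet? [0, cnt1 1 A, cnt1 2 A, cnt1 3 A, cnt1 4 A, cnt1 5 A, cnt1 6 A] (2:Int)).getD 0 = cnt1 2 A from rfl,
      show (PySem.List.pyGet? [0, cnt1 1 A, cnt1 2 A, cnt1 3 A, cnt1 4 A, cnt1 5 A, cnt1 6 A] (3:Int)).getD 0 = cnt1 3 A from rfl,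
      show (PySem.List.pyGet? [0, cnt1 1 A, cnt1 2 A, cnt1 3 A, cnt1 4 A, cnt1 5 A, cnt1 6 A] (4:Int)).getD 0 = cnt1 4 A from rfl,
      show (PySem.List.pyGet? [0, cnt1 1 A, cnt1 2 A, cnt1 3 A, cnt1 4 A, cnt1 5 A, cnt1 6 A] (5:Int)).getD 0 = cnt1 5 A from rfl,
      show (PySem.List.pyGet? [0, cnt1 1 A, cnt1 2 A, cnt1 3 A, cnt1 4 A, cnt1 5 A, cnt1 6 A] (6:Int)).getD 0 = cnt1 6 A from rfl,
      show (PySem.List.pyGet? [0, cnt1 1 A, cnt1 2 A, cnt1 3 A, cnt1 4 A, cnt1 5 A, cnt1 6 A] (7-(1:Int))).getD 0 = cnt1 6 A from rfl,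
      show (PySem.List.pyGet? [0, cnt1 1 A, cnt1 2 A, cnt1 3 A, cnt1 4 A, cnt1 5 A, cnt1 6 A] (7-(2:Int))).getD 0 = cnt1 5 A from rfl,
      show (PySem.List.pyGet? [0, cnt1 1 A, cnt1 2 A, cnt1 3 A, cnt1 4 A, cnt1 5 A, cnt1 6 A] (7-(3:Int))).getD 0 = cnt1 4 A from rfl,
      show (PySem.List.pyGet? [0, cnt1 1 A, cnt1 2 A, cnt1 3 A, cnt1 4 A, cnt1 5 A, cnt1 6 A] (7-(4:Int))).getD 0 = cnt1 3 A from rfl,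
      show (PySem.List.pyGet? [0, cnt1 1 A, cnt1 2 A, cnt1 3 A, cnt1 4 A, cnt1 5 A, cnt1 6 A] (7-(5:Int))).getD 0 = cnt1 2 A from rfl,
      show (PySem.List.pyGet? [0, cnt1 1 A, cnt1 2 A, cnt1 3 A, cnt1 4 A, cnt1 5 A, cnt1 6 A] (7-(6:Int))).getD 0 = cnt1 1 A from rfl]
  have hmin : ∀ (u v : List Int), u = v →
      (PySem.List.min? u (fun y => y)).getD 0 = (PySem.List.min? v (fun y => y)).getD 0 := by
    intro u v h; rw [h]
  apply hmin
  simp only [List.cons_append, List.nil_append, zero_add, List.cons.injEq, and_true]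
  norm_num
  omega

-- ===== VERDICT (by name: the statement is the Claim_ definition above) =====
theorem solution_spec : Claim_equal_solution := by
  intro A _
  unfold Spec_solution
  exact solution_eq A
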